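-- pv_equiv track=rewrite | github.com/sveinnoli/vefthr3-Api | app.py | CompanyExists
-- ===== SOURCE A (Python) =====
-- def CompanyExists(company, company_image):
--     image_list = {}
--     for x in range(len(company)):
--         for key, value in company_image.items():
--             if key == company[x]:
--                 image_list[company[x]] = value
--             else:
--                 pass
--     return image_list
-- ===== SOURCE B (Python) =====
-- def CompanyExists(company, company_image):
--     # Recursive decomposition: build the matched (name, image) pairs front-to-back,
--     # skipping duplicates with an explicit 'seen' set, then turn the pair list into a dict.
--     def pick(names, seen):
--         if not names:
--             return []
--         name, rest = names[0], names[1:]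
--         if name in company_image and name not in seen:
--             return [(name, company_image[name])] + pick(rest, seen | {name})
--         return pick(rest, seen)
--     return dict(pick(company, set()))
-- ===== Notes on version B (the rewrite author's own statement) =====
-- stated objective: alternative
-- what changed: Replaces A's nested loops that mutate a dict accumulator (full scan of the dict per name, overwriting on duplicates) with a structural recursion over the names that constructs the result as an explicit pair list front-to-back, deduplicating via a separate seen-set, and converts that list to a dict once at the end.
import Mathlib
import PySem

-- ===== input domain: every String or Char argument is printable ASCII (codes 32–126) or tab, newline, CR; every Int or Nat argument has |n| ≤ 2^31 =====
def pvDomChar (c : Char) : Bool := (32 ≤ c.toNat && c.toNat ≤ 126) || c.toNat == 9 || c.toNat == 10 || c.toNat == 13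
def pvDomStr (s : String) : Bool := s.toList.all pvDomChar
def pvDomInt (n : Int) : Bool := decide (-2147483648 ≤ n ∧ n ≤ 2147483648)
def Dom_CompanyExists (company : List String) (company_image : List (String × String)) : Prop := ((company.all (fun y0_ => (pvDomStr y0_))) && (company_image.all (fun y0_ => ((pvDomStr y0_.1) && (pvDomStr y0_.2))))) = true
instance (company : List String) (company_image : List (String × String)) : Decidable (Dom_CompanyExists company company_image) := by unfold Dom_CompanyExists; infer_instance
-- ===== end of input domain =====

-- B replaces A's nested loops mutating a dict accumulator by a structural recursion over the
-- names that builds the matched (name, image) pairs as an explicit list with a seen-set, then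
-- makes a dict of them once at the end (alternative decomposition, not claimed faster).


-- ===== PORT A =====
-- for x in range(len(company)): for key, value in company_image.items(): if key == company[x]: image_list[company[x]] = value
def CompanyExists (company : List String) (company_image : List (String × String)) : List (String × String) :=
  ((PySem.List.pyRange 0 (company.length : Int) 1).foldl
    (fun image_list x =>
      company_image.foldl
        (fun d kv =>
          if kv.1 == PySem.List.pyGetD company x "" then
            d.insert (PySem.List.pyGetD company x "") kv.2
          else d)
        image_list)
    PySem.Dict.empty).items

-- ===== PORT B =====
-- def pick(names, seen): recursion over the names, emitting (name, company_image[name]) for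
-- each fresh matched name, with 'seen' the set of names already emitted
def pickB (ci : List (String × String)) : List String → PySem.Set String → List (String × String)
  | [], _ => []
  | name :: rest, seen =>
    match (PySem.Dict.mk ci).get? name with
    | some v =>
      if seen.contains name then pickB ci rest seen
      else (name, v) :: pickB ci rest (seen.add name)
    | none => pickB ci rest seen

-- return dict(pick(company, set()))
def CompanyExists_alt (company : List String) (company_image : List (String × String)) : List (String × String) :=
  (PySem.Dict.ofList (pickB company_image company PySem.Set.empty)).items

-- ===== PRECONDITION & SPEC =====
-- company_image denotes a Python dict, whose keys are necessarily distinct; Pre_ states that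
-- representation invariant (it excludes no dict A actually receives).
def Pre_CompanyExists (company : List String) (company_image : List (String × String)) : Prop :=
  (company_image.map Prod.fst).Nodup
instance (company : List String) (company_image : List (String × String)) : Decidable (Pre_CompanyExists company company_image) := by unfold Pre_CompanyExists; infer_instance

def pvWitness_CompanyExists : List String × (List (String × String)) := (["a", "b"], [("a", "x"), ("c", "y")])

def Spec_CompanyExists (company : List String) (company_image : List (String × String)) (out : List (String × String)) : Prop := out = CompanyExists_alt company company_image
instance (company : List String) (company_image : List (String × String)) (out : List (String × String)) : Decidable (Spec_CompanyExists company company_image out) := by unfold Spec_CompanyExists; infer_instance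

-- ===== CLAIM (what is proved, stated in full; the proofs are below) =====
def Claim_equal_CompanyExists : Prop := ∀ (company : List String) (company_image : List (String × String)), Dom_CompanyExists company company_image → Pre_CompanyExists company company_image → Spec_CompanyExists company company_image (CompanyExists company company_image)

-- ===== LEMMAS AND PROOFS =====

-- A's inner scan does nothing when no item's key equals the name.
theorem inner_no_match (l : List (String × String)) (name : String)
    (d : PySem.Dict String String) (h : ∀ kv ∈ l, kv.1 ≠ name) :
    l.foldl (fun d kv => if kv.1 == name then d.insert name kv.2 else d) d = d := by
  induction l generalizing d with
  | nil => rfl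
  | cons kv rest ih =>
    have hb : (kv.1 == name) = false := beq_eq_false_iff_ne.mpr (h kv (List.mem_cons_self ..))
    rw [List.foldl_cons, if_neg (by simp [hb])]
    exact ih d (fun p hp => h p (List.mem_cons_of_mem _ hp))

-- With distinct keys, A's inner scan over the items equals one dict lookup.
theorem inner_eq_lookup (l : List (String × String)) (name : String)
    (d : PySem.Dict String String) (hnd : (l.map Prod.fst).Nodup) :
    l.foldl (fun d kv => if kv.1 == name then d.insert name kv.2 else d) d =
      (match (PySem.Dict.mk l).get? name with
       | some v => d.insert name v
       | none => d) := by
  induction l generalizing d with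
  | nil => simp [PySem.Dict.get?]
  | cons kv rest ih =>
    simp only [List.map_cons, List.nodup_cons] at hnd
    rw [PySem.Dict.get?_mk_cons]
    by_cases hk : kv.1 = name
    · subst hk
      have hnm : ∀ p ∈ rest, p.1 ≠ kv.1 := by
        intro p hp hpe
        exact hnd.1 (hpe ▸ List.mem_map_of_mem hp)
      rw [List.foldl_cons, if_pos (by simp : (kv.1 == kv.1) = true),
        inner_no_match rest kv.1 (d.insert kv.1 kv.2) hnm]
      simp
    · have hb : (kv.1 == name) = false := beq_eq_false_iff_ne.mpr hk
      rw [List.foldl_cons, if_neg (by simp [hb]), ih d hnd.2, hb]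
      simp

-- Re-inserting a key with the value it already maps to leaves the dict unchanged.
theorem insert_same (d : PySem.Dict String String) (k : String) (v : String)
    (hnd : d.keys.Nodup) (h : d.get? k = some v) : d.insert k v = d := by
  have hc : d.contains k = true := by
    rw [PySem.Dict.contains_eq_isSome_get?, h]; rfl
  apply PySem.Dict.ext
  rw [PySem.Dict.items_insert_of_contains d v hc]
  have hmap : List.map (fun p => if (p.1 == k) = true then (k, v) else p) d.items
      = List.map id d.items := by
    apply List.map_congr_left
    intro p hp
    by_cases hpk : p.1 = k
    · have h2 := PySem.Dict.get?_of_mem_items d (k := p.1) (v := p.2) hp hnd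
      rw [hpk, h] at h2
      simp [hpk, Prod.ext_iff, Option.some_inj.mp h2]
    · simp [beq_eq_false_iff_ne.mpr hpk]
  rw [hmap, List.map_id]

-- Invariant tying A's dict-accumulator loop to B's list recursion: if 'seen' has exactly the
-- keys of d and d only stores values the source dict holds, the remaining loop appends
-- exactly the pairs pickB emits.
theorem foldA_eq_pickB (ci : List (String × String)) (names : List String)
    (d : PySem.Dict String String) (seen : PySem.Set String)
    (hnd : d.keys.Nodup)
    (hmem : ∀ k, seen.contains k = d.contains k)
    (hval : ∀ k v, d.get? k = some v → (PySem.Dict.mk ci).get? k = some v) :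
    (names.foldl (fun d name =>
        match (PySem.Dict.mk ci).get? name with
        | some v => d.insert name v
        | none => d) d).items
      = d.items ++ pickB ci names seen := by
  induction names generalizing d seen with
  | nil => simp [pickB]
  | cons name rest ih =>
    rw [List.foldl_cons]
    cases h : (PySem.Dict.mk ci).get? name with
    | none =>
      simp only [pickB, h]
      exact ih d seen hnd hmem hval
    | some v =>
      simp only [pickB, h]
      by_cases hc : d.contains name = true
      · -- already inserted: A overwrites with the same value, B skips
        have hv : d.get? name = some v := by
          rw [PySem.Dict.contains_eq_isSome_get?] at hc
          obtain ⟨v', hv'⟩ := Option.isSome_iff_exists.mp hc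
          have := hval name v' hv'
          rw [h] at this
          rw [hv', Option.some_inj.mp this]
        rw [if_pos (by rw [hmem name]; exact hc), insert_same d name v hnd hv]
        exact ih d seen hnd hmem hval
      · -- fresh name: A appends (name, v), B emits it and adds name to 'seen'
        have hcf : d.contains name = false := by
          cases hb : d.contains name with
          | false => rfl
          | true => exact absurd hb hc
        rw [if_neg (by rw [hmem name, hcf]; exact Bool.false_ne_true)]
        have hnd' := PySem.Dict.nodup_keys_insert d name v hnd
        have hsf : seen.contains name = false := by rw [hmem name]; exact hcf
        have hns : name ∉ seen := by simpa [PySem.Set.contains, List.contains_eq_mem] using hsf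
        have hmem' : ∀ k, (seen.add name).contains k = (d.insert name v).contains k := by
          intro k
          rw [PySem.Dict.contains_insert, ← hmem k]
          simp only [PySem.Set.add, PySem.Set.contains]
          rw [if_neg (by simpa [List.contains_eq_mem] using hns)]
          simp [List.contains_eq_mem, List.mem_append, or_comm, beq_eq_decide]
        have hval' : ∀ k w, (d.insert name v).get? k = some w → (PySem.Dict.mk ci).get? k = some w := by
          intro k w hw
          rw [PySem.Dict.get?_insert] at hw
          by_cases hk : k = name
          · rw [if_pos hk] at hw
            rw [hk, h, ← Option.some_inj.mp hw]
          · rw [if_neg hk] at hw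
            exact hval k w hw
        rw [ih (d.insert name v) (seen.add name) hnd' hmem' hval',
          PySem.Dict.items_insert_of_not_contains d v hcf, List.append_assoc]
        rfl

-- Every pair pickB emits has a key outside 'seen'.
theorem pickB_not_seen (ci : List (String × String)) (names : List String)
    (seen : PySem.Set String) (p : String × String) (hp : p ∈ pickB ci names seen) :
    p.1 ∉ seen := by
  induction names generalizing seen with
  | nil => simp [pickB] at hp
  | cons name rest ih =>
    cases h : (PySem.Dict.mk ci).get? name with
    | none => simp only [pickB, h] at hp; exact ih seen hp
    | some v =>
      simp only [pickB, h] at hp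
      by_cases hs : seen.contains name = true
      · rw [if_pos hs] at hp; exact ih seen hp
      · rw [if_neg hs] at hp
        rcases List.mem_cons.mp hp with hph | hpt
        · intro hmem
          exact hs (by simpa [PySem.Set.contains, hph] using hmem)
        · intro hmem
          exact ih (seen.add name) hpt ((PySem.Set.mem_add seen name p.1).mpr (Or.inl hmem))

-- pickB's keys are pairwise distinct.
theorem pickB_nodup (ci : List (String × String)) (names : List String)
    (seen : PySem.Set String) : ((pickB ci names seen).map Prod.fst).Nodup := by
  induction names generalizing seen with
  | nil => simp [pickB]
  | cons name rest ih =>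
    cases h : (PySem.Dict.mk ci).get? name with
    | none => simp only [pickB, h]; exact ih seen
    | some v =>
      simp only [pickB, h]
      by_cases hs : seen.contains name = true
      · rw [if_pos hs]; exact ih seen
      · rw [if_neg hs]
        simp only [List.map_cons, List.nodup_cons]
        refine ⟨?_, ih (seen.add name)⟩
        intro hmem
        obtain ⟨p, hp, hpk⟩ := List.mem_map.mp hmem
        exact pickB_not_seen ci rest (seen.add name) p hp
          ((PySem.Set.mem_add seen name p.1).mpr (Or.inr hpk))

-- dict() of a pair list with distinct keys has exactly those items.
theorem items_ofList_nodup (l : List (String × String)) (h : (l.map Prod.fst).Nodup) :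
    (PySem.Dict.ofList l).items = l := by
  have := PySem.Dict.items_foldl_insert_fresh l Prod.fst Prod.snd
    (PySem.Dict.empty : PySem.Dict String String)
    (fun a _ => PySem.Dict.contains_empty a.1) h
  simpa [PySem.Dict.ofList, PySem.Dict.update] using this

-- ===== VERDICT (by name: the statement is the Claim_ definition above) =====
theorem CompanyExists_spec : Claim_equal_CompanyExists := by
  intro company company_image _ hpre
  unfold Spec_CompanyExists CompanyExists CompanyExists_alt
  rw [PySem.List.foldl_pyRange_zero_pyGetD' company ""
    (fun d name => company_image.foldl
      (fun d kv => if kv.1 == name then d.insert name kv.2 else d) d)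
    PySem.Dict.empty]
  have hstep : (fun (d : PySem.Dict String String) (name : String) =>
      company_image.foldl (fun d kv => if kv.1 == name then d.insert name kv.2 else d) d)
    = (fun d name =>
        match (PySem.Dict.mk company_image).get? name with
        | some v => d.insert name v
        | none => d) := by
    funext d name
    exact inner_eq_lookup company_image name d hpre
  rw [hstep,
    foldA_eq_pickB company_image company PySem.Dict.empty PySem.Set.empty
      PySem.Dict.nodup_keys_empty
      (fun k => by simp [PySem.Set.empty, PySem.Set.contains, PySem.Dict.contains_empty])
      (fun k v hv => by rw [PySem.Dict.get?_empty] at hv; exact absurd hv (by simp)),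
    items_ofList_nodup _ (pickB_nodup company_image company PySem.Set.empty)]
  rfl
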